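-- pv_equiv track=rewrite | github.com/EarthOnline/AdventOfCode | 2018/day_20.py | split_substring
-- ===== SOURCE A (Python) =====
-- from typing import List
--
-- def split_substring(regex: str) -> List[str]:
--     bracket = 0
--     regexes = list()
--     regexes.append('')
--
--     for x in regex:
--         if x == "(":
--             bracket += 1
--             if bracket == 1:
--                 regexes.append('')
--                 continue
--         if x == ")":
--             bracket -= 1
--             if bracket == 0:
--                 regexes.append('')
--                 continue
--         regexes[-1] += x
--     return regexes
-- ===== SOURCE B (Python) =====
-- from typing import List
--
-- def split_substring(regex: str) -> List[str]:
--     # Pass 1: record indices of top-level boundary characters.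
--     cuts = []
--     bracket = 0
--     for i, x in enumerate(regex):
--         if x == '(':
--             bracket += 1
--             if bracket == 1:
--                 cuts.append(i)
--         elif x == ')':
--             bracket -= 1
--             if bracket == 0:
--                 cuts.append(i)
--     # Pass 2: slice out the segments between consecutive boundaries.
--     segs = []
--     prev = 0
--     for c in cuts:
--         segs.append(regex[prev:c])
--         prev = c + 1
--     segs.append(regex[prev:])
--     return segs
-- ===== Notes on version B (the rewrite author's own statement) =====
-- stated objective: faster
-- what changed: A makes one scan that repeatedly re-concatenates each character onto the last string of a growing list; B first records the indices of top-level boundary parentheses in one pass, then builds each segment with a single string slice between consecutive boundaries.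
import Mathlib
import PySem

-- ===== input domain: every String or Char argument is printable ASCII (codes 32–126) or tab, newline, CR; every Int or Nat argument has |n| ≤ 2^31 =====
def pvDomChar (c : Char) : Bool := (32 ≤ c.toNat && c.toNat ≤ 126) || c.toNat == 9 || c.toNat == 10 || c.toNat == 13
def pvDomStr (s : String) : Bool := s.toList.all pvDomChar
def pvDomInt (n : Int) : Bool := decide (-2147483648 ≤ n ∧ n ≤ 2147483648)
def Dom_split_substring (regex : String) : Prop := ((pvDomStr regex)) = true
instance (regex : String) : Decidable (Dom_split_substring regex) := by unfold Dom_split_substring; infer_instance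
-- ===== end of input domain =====

-- B replaces A's single scan that repeatedly re-concatenates onto the last list
-- element with a two-pass decomposition: first record the top-level boundary
-- indices, then slice the string between consecutive boundaries.

-- ===== PORT A =====
-- regexes[-1] += x  (regexes is always nonempty in A)
def pvAppendLast (rs : List String) (x : Char) : List String :=
  rs.dropLast ++ [(rs.getLastD "").push x]

def pvStepA (st : Int × List String) (x : Char) : Int × List String :=
  if x = '(' then
    let b := st.1 + 1
    if b = 1 then (b, st.2 ++ [""]) else (b, pvAppendLast st.2 x)
  else if x = ')' then
    let b := st.1 - 1
    if b = 0 then (b, st.2 ++ [""]) else (b, pvAppendLast st.2 x)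
  else (st.1, pvAppendLast st.2 x)

def split_substring (regex : String) : List String :=
  (regex.toList.foldl pvStepA (0, [""])).2

-- ===== PORT B =====
-- pass 1 body: maintain (bracket, cuts); record i when the boundary fires
def pvCutStep (st : Int × List Int) (p : Int × Char) : Int × List Int :=
  if p.2 = '(' then
    let b := st.1 + 1
    if b = 1 then (b, st.2 ++ [p.1]) else (b, st.2)
  else if p.2 = ')' then
    let b := st.1 - 1
    if b = 0 then (b, st.2 ++ [p.1]) else (b, st.2)
  else st

-- pass 2 body: segs.append(regex[prev:c]); prev = c + 1
def pvSegStep (s : String) (st : List String × Int) (c : Int) : List String × Int :=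
  (st.1 ++ [String.ofList (PySem.List.slice s.toList (some st.2) (some c))], c + 1)

def split_substring_alt (regex : String) : List String :=
  let cuts := (PySem.List.enumerate regex.toList 0).foldl pvCutStep (0, [])
  let fin := cuts.2.foldl (pvSegStep regex) ([], 0)
  fin.1 ++ [String.ofList (PySem.List.slice regex.toList (some fin.2) none)]

-- ===== PRECONDITION & SPEC =====
def Spec_split_substring (regex : String) (out : List String) : Prop := out = split_substring_alt regex
instance (regex : String) (out : List String) : Decidable (Spec_split_substring regex out) := by unfold Spec_split_substring; infer_instance

-- ===== CLAIM =====
def Claim_equal_split_substring : Prop := ∀ (regex : String), Dom_split_substring regex → Spec_split_substring regex (split_substring regex)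

-- ===== LEMMAS AND PROOFS =====

def pvBstep (b : Int) (x : Char) : Int :=
  if x = '(' then b + 1 else if x = ')' then b - 1 else b

-- common specification: front recursion producing the segment list
def pvConsHead (s : String) : List String → List String
  | [] => [s]
  | h :: t => (s ++ h) :: t

def pvG : List Char → Int → List String
  | [], _ => [""]
  | x :: rest, b =>
    let b' := pvBstep b x
    if (x = '(' ∧ b' = 1) ∨ (x = ')' ∧ b' = 0) then "" :: pvG rest b'
    else pvConsHead (String.ofList [x]) (pvG rest b')

-- specification of pass-1's cut list
def pvCuts : List Char → Int → Int → List Int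
  | [], _, _ => []
  | x :: rest, b, k =>
    let b' := pvBstep b x
    if (x = '(' ∧ b' = 1) ∨ (x = ')' ∧ b' = 0) then k :: pvCuts rest b' (k + 1)
    else pvCuts rest b' (k + 1)

theorem pvConsHead_ne (s : String) (l : List String) : pvConsHead s l ≠ [] := by
  cases l <;> simp [pvConsHead]

theorem pvG_ne (cs : List Char) (b : Int) : pvG cs b ≠ [] := by
  cases cs with
  | nil => simp [pvG]
  | cons x rest =>
    simp only [pvG]
    split
    · simp
    · exact pvConsHead_ne _ _

theorem pvG_cons_exists (cs : List Char) (b : Int) : ∃ h t, pvG cs b = h :: t := by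
  cases hG : pvG cs b with
  | nil => exact absurd hG (pvG_ne cs b)
  | cons h t => exact ⟨h, t, rfl⟩

theorem pv_push_eq (s : String) (c : Char) : s.push c = s ++ String.ofList [c] := by
  simp [String.push_eq_append, String.singleton_eq_ofList]

-- A-side invariant: running A's loop with accumulated list rs ++ [cur]
theorem pvA_inv (cs : List Char) : ∀ (b : Int) (rs : List String) (cur : String),
    (cs.foldl pvStepA (b, rs ++ [cur])).2 = rs ++ pvConsHead cur (pvG cs b) := by
  induction cs with
  | nil => intro b rs cur; simp [pvG, pvConsHead]
  | cons x rest ih =>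
    intro b rs cur
    obtain ⟨h, t, hg⟩ := pvG_cons_exists rest (pvBstep b x)
    have hlast : pvAppendLast (rs ++ [cur]) x = rs ++ [cur.push x] := by
      simp [pvAppendLast]
    by_cases hx : x = '('
    · subst hx
      have hbs : pvBstep b '(' = b + 1 := by simp [pvBstep]
      rw [hbs] at hg
      by_cases hb : b + 1 = 1
      · have hstep : pvStepA (b, rs ++ [cur]) '(' = (b + 1, (rs ++ [cur]) ++ [""]) := by
          simp [pvStepA, hb]
        rw [List.foldl_cons, hstep, ih (b + 1) (rs ++ [cur]) ""]
        rw [hb] at hg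
        simp [pvG, pvBstep, hb, hg, pvConsHead]
      · have hstep : pvStepA (b, rs ++ [cur]) '(' = (b + 1, rs ++ [cur.push '(']) := by
          simp [pvStepA, hb, hlast]
        rw [List.foldl_cons, hstep, ih (b + 1) rs (cur.push '(')]
        simp [pvG, pvBstep, hb, hg, pvConsHead, pv_push_eq, String.append_assoc]
    · by_cases hy : x = ')'
      · subst hy
        have hbs : pvBstep b ')' = b - 1 := by simp [pvBstep]
        rw [hbs] at hg
        by_cases hb : b - 1 = 0
        · have hstep : pvStepA (b, rs ++ [cur]) ')' = (b - 1, (rs ++ [cur]) ++ [""]) := by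
            simp [pvStepA, hb]
          rw [List.foldl_cons, hstep, ih (b - 1) (rs ++ [cur]) ""]
          rw [hb] at hg
          simp [pvG, pvBstep, hb, hg, pvConsHead]
        · have hstep : pvStepA (b, rs ++ [cur]) ')' = (b - 1, rs ++ [cur.push ')']) := by
            simp [pvStepA, hb, hlast]
          rw [List.foldl_cons, hstep, ih (b - 1) rs (cur.push ')')]
          simp [pvG, pvBstep, hb, hg, pvConsHead, pv_push_eq, String.append_assoc]
      · have hbs : pvBstep b x = b := by simp [pvBstep, hx, hy]
        rw [hbs] at hg
        have hstep : pvStepA (b, rs ++ [cur]) x = (b, rs ++ [cur.push x]) := by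
          simp [pvStepA, hx, hy, hlast]
        rw [List.foldl_cons, hstep, ih b rs (cur.push x)]
        simp [pvG, pvBstep, hx, hy, hg, pvConsHead, pv_push_eq, String.append_assoc]

-- pass-1 invariant: the fold over enumerate collects exactly pvCuts
theorem pvCuts_inv (cs : List Char) : ∀ (b : Int) (k : Int) (acc : List Int),
    ((PySem.List.enumerate cs k).foldl pvCutStep (b, acc)).2 = acc ++ pvCuts cs b k := by
  induction cs with
  | nil => intro b k acc; simp [PySem.List.enumerate_nil, pvCuts]
  | cons x rest ih =>
    intro b k acc
    rw [PySem.List.enumerate_cons, List.foldl_cons]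
    by_cases hx : x = '('
    · subst hx
      by_cases hb : b + 1 = 1
      · have : pvCutStep (b, acc) (k, '(') = (b + 1, acc ++ [k]) := by simp [pvCutStep, hb]
        rw [this, ih]
        simp [pvCuts, pvBstep, hb]
      · have : pvCutStep (b, acc) (k, '(') = (b + 1, acc) := by simp [pvCutStep, hb]
        rw [this, ih]
        simp [pvCuts, pvBstep, hb]
    · by_cases hy : x = ')'
      · subst hy
        by_cases hb : b - 1 = 0
        · have : pvCutStep (b, acc) (k, ')') = (b - 1, acc ++ [k]) := by simp [pvCutStep, hb]
          rw [this, ih]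
          simp [pvCuts, pvBstep, hb]
        · have : pvCutStep (b, acc) (k, ')') = (b - 1, acc) := by simp [pvCutStep, hb]
          rw [this, ih]
          simp [pvCuts, pvBstep, hb]
      · have : pvCutStep (b, acc) (k, x) = (b, acc) := by simp [pvCutStep, hx, hy]
        rw [this, ih]
        simp [pvCuts, pvBstep, hx, hy]

theorem pvConsHead_append (s1 s2 : String) (l : List String) :
    pvConsHead (s1 ++ s2) l = pvConsHead s1 (pvConsHead s2 l) := by
  cases l <;> simp [pvConsHead, String.append_assoc]

-- pass-2 invariant: folding pvSegStep over pvCuts assembles pvG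
theorem pvSeg_inv (cs : List Char) : ∀ (b : Int) (s : String) (pre : List Char)
    (prev : Nat) (acc : List String), s.toList = pre ++ cs → prev ≤ pre.length →
    (let fin := (pvCuts cs b (pre.length : Int)).foldl (pvSegStep s) (acc, (prev : Int))
     fin.1 ++ [String.ofList (PySem.List.slice s.toList (some fin.2) none)])
    = acc ++ pvConsHead (String.ofList ((s.toList.drop prev).take (pre.length - prev))) (pvG cs b) := by
  induction cs with
  | nil =>
    intro b s pre prev acc hs hle
    simp only [pvCuts, List.foldl_nil, pvG]
    rw [PySem.List.slice_from_natCast]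
    have hlen : (s.toList.drop prev).length = pre.length - prev := by
      simp [hs, List.length_drop]
    rw [show (s.toList.drop prev).take (pre.length - prev) = s.toList.drop prev by
      rw [← hlen, List.take_length]]
    simp [pvConsHead]
  | cons x rest ih =>
    intro b s pre prev acc hs hle
    have hdrop : s.toList.drop prev = pre.drop prev ++ x :: rest := by
      rw [hs, List.drop_append_of_le_length hle]
    have hdlen : (pre.drop prev).length = pre.length - prev := by
      simp [List.length_drop]
    have htake1 : (s.toList.drop prev).take (pre.length - prev) = pre.drop prev := by
      rw [hdrop, ← hdlen, List.take_left]
    by_cases hbd : (x = '(' ∧ pvBstep b x = 1) ∨ (x = ')' ∧ pvBstep b x = 0)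
    · simp only [pvCuts, if_pos hbd, List.foldl_cons]
      have hstep : pvSegStep s (acc, (prev : Int)) (pre.length : Int)
          = (acc ++ [String.ofList ((s.toList.drop prev).take (pre.length - prev))],
             (pre.length : Int) + 1) := by
        simp [pvSegStep, PySem.List.slice_natCast]
      rw [hstep]
      have hcast : ((pre.length : Int) + 1) = (((pre ++ [x]).length : Nat) : Int) := by
        simp
      rw [show ((pre.length : Int) + 1) = (((pre ++ [x]).length : Nat) : Int) from hcast]
      have ihx := ih (pvBstep b x) s (pre ++ [x]) (pre ++ [x]).length
        (acc ++ [String.ofList ((s.toList.drop prev).take (pre.length - prev))])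
        (by rw [hs]; simp) (le_refl _)
      simp only at ihx
      rw [ihx]
      obtain ⟨h, t, hg⟩ := pvG_cons_exists rest (pvBstep b x)
      simp [pvG, if_pos hbd, hg, pvConsHead, htake1]
    · simp only [pvCuts, if_neg hbd]
      have hcast : ((pre.length : Int) + 1) = (((pre ++ [x]).length : Nat) : Int) := by
        simp
      rw [show ((pre.length : Int) + 1) = (((pre ++ [x]).length : Nat) : Int) from hcast]
      have ihx := ih (pvBstep b x) s (pre ++ [x]) prev acc
        (by rw [hs]; simp) (by simp; omega)
      simp only at ihx
      rw [ihx]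
      have htake2 : (s.toList.drop prev).take ((pre ++ [x]).length - prev)
          = pre.drop prev ++ [x] := by
        have h1 : (pre ++ [x]).length - prev = (pre.drop prev ++ [x]).length := by
          simp [List.length_drop]; omega
        rw [hdrop, h1,
          show pre.drop prev ++ x :: rest = (pre.drop prev ++ [x]) ++ rest by simp]
        exact List.take_left
      rw [htake2, htake1]
      simp only [pvG, if_neg hbd]
      rw [show String.ofList (pre.drop prev ++ [x])
            = String.ofList (pre.drop prev) ++ String.ofList [x] by
        rw [String.ofList_append]]
      rw [pvConsHead_append]

-- ===== VERDICT =====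
theorem split_substring_spec : Claim_equal_split_substring := by
  intro regex _
  unfold Spec_split_substring split_substring split_substring_alt
  have hA := pvA_inv regex.toList 0 [] ""
  simp only [List.nil_append] at hA
  rw [hA]
  have hC := pvCuts_inv regex.toList 0 0 []
  simp only [List.nil_append] at hC
  have hS := pvSeg_inv regex.toList 0 regex [] 0 [] (by simp) (by simp)
  simp only [List.length_nil, Nat.cast_zero, List.drop_zero,
    List.nil_append] at hS
  show pvConsHead "" (pvG regex.toList 0) =
    (List.foldl (pvSegStep regex) ([], 0)
      ((List.foldl pvCutStep (0, []) (PySem.List.enumerate regex.toList 0)).2)).1 ++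
    [String.ofList (PySem.List.slice regex.toList
      (some (List.foldl (pvSegStep regex) ([], 0)
        ((List.foldl pvCutStep (0, []) (PySem.List.enumerate regex.toList 0)).2)).2) none)]
  rw [hC, hS]
  obtain ⟨h, t, hg⟩ := pvG_cons_exists regex.toList 0
  simp [hg, pvConsHead]
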